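-- pv_equiv track=rewrite | github.com/KamilDemel/LeetCode-Grind | WDI_Fundamentals/thirteen_squares_sum.py | solve_thirteen
-- ===== SOURCE A (Python) =====
-- def solve_thirteen(T):
--     N = len(T)
--
--     def rek_pomoc(i=0, licznik=0, suma_pol=0, wybrane=None):
--         if wybrane is None:
--             wybrane = []
--
--         if licznik == 13 and suma_pol == 2024:
--             return True
--
--         if i == N:
--             return False
--
--         x1, x2, y1, y2 = T[i]
--         czy_biore = True
--
--         for j in range(len(wybrane)):
--             x3, x4, y3, y4 = wybrane[j]
--             sa_rozlaczne = (x2 < x3 or x1 > x4 or y2 < y3 or y1 > y4)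
--             if not sa_rozlaczne:
--                 czy_biore = False
--                 break
--
--         if czy_biore:
--             pole = abs(x2 - x1) * abs(x2 - x1)
--             if rek_pomoc(i + 1, licznik + 1, suma_pol + pole, wybrane + [T[i]]):
--                 return True
--
--         if rek_pomoc(i + 1, licznik, suma_pol, wybrane):
--             return True
--
--         return False
--
--     return rek_pomoc()
-- ===== SOURCE B (Python) =====
-- def solve_thirteen(T):
--     N = len(T)
--
--     def disjoint(a, b):
--         x1, x2, y1, y2 = a
--         x3, x4, y3, y4 = b
--         return x2 < x3 or x1 > x4 or y2 < y3 or y1 > y4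
--
--     def search(start, count, total, chosen):
--         if count == 13:
--             return total == 2024
--         for j in range(start, N):
--             if all(disjoint(T[j], c) for c in chosen):
--                 x1, x2, _, _ = T[j]
--                 if search(j + 1, count + 1, total + abs(x2 - x1) ** 2, chosen + [T[j]]):
--                     return True
--         return False
--
--     return search(0, 0, 0, [])
-- ===== Notes on version B (the rewrite author's own statement) =====
-- stated objective: alternative
-- what changed: Replaces the per-index take/skip binary backtracking (which keeps recursing even after 13 picks) with combination-style enumeration: a recursive search that loops over the next candidate index among the remaining ones, stops a branch as soon as 13 rectangles are chosen, and tests the sum there.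
import Mathlib
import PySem

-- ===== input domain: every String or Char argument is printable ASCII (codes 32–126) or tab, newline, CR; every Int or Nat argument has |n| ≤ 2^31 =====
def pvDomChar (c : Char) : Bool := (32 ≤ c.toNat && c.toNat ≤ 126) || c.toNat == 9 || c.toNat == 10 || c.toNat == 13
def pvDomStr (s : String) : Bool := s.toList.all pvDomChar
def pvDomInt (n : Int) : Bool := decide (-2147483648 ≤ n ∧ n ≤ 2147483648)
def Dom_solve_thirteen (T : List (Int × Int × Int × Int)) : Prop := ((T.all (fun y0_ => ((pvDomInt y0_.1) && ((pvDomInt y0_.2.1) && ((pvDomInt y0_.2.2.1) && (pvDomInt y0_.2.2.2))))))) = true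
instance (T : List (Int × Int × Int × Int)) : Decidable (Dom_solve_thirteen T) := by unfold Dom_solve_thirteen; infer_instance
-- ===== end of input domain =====

-- B replaces A's per-index take/skip backtracking with combination-style enumeration
-- (loop over the next candidate index, branch cut once 13 rectangles are chosen);
-- objective: alternative decomposition of the same exhaustive search.

-- ===== PORT A =====
-- rek_pomoc; i only ever reaches N from below, so 'i == N' is ported as 'N ≤ i' (exact
-- on all reachable states, and total); T[i] is ported as getD (i < N holds at every use).
def rek_pomoc (T : List (Int × Int × Int × Int)) (N : Nat) (i : Nat)
    (licznik : Int) (suma_pol : Int) (wybrane : List (Int × Int × Int × Int)) : Bool :=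
  if licznik = 13 ∧ suma_pol = 2024 then true
  else if N ≤ i then false
  else
    let t := T.getD i (0, 0, 0, 0)
    -- the for-loop with break computes: t is disjoint from every element of wybrane
    let czy_biore := wybrane.all (fun b =>
      t.2.1 < b.1 || t.1 > b.2.1 || t.2.2.2 < b.2.2.1 || t.2.2.1 > b.2.2.2)
    if czy_biore then
      let pole := |t.2.1 - t.1| * |t.2.1 - t.1|
      if rek_pomoc T N (i + 1) (licznik + 1) (suma_pol + pole) (wybrane ++ [t]) then true
      else rek_pomoc T N (i + 1) licznik suma_pol wybrane
    else rek_pomoc T N (i + 1) licznik suma_pol wybrane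
termination_by N - i
decreasing_by all_goals omega

def solve_thirteen (T : List (Int × Int × Int × Int)) : Bool :=
  rek_pomoc T T.length 0 0 0 []

-- ===== PORT B =====
def disjointB (a b : Int × Int × Int × Int) : Bool :=
  a.2.1 < b.1 || a.1 > b.2.1 || a.2.2.2 < b.2.2.1 || a.2.2.1 > b.2.2.2

mutual
-- 'search' of Source B
def searchB (T : List (Int × Int × Int × Int)) (N : Nat) (start : Nat)
    (count : Int) (total : Int) (chosen : List (Int × Int × Int × Int)) : Bool :=
  if count = 13 then decide (total = 2024)
  else loopB T N start count total chosen
termination_by (N - start, 1)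
decreasing_by omega
-- the 'for j in range(start, N)' loop of 'search', with its early return
def loopB (T : List (Int × Int × Int × Int)) (N : Nat) (j : Nat)
    (count : Int) (total : Int) (chosen : List (Int × Int × Int × Int)) : Bool :=
  if N ≤ j then false
  else
    let t := T.getD j (0, 0, 0, 0)
    if chosen.all (fun c => disjointB t c) &&
        searchB T N (j + 1) (count + 1) (total + |t.2.1 - t.1| ^ 2) (chosen ++ [t]) then
      true
    else loopB T N (j + 1) count total chosen
termination_by (N - j, 0)
decreasing_by all_goals omega
end

def solve_thirteen_alt (T : List (Int × Int × Int × Int)) : Bool :=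
  searchB T T.length 0 0 0 []

-- ===== PRECONDITION & SPEC =====
def Spec_solve_thirteen (T : List (Int × Int × Int × Int)) (out : Bool) : Prop := out = solve_thirteen_alt T
instance (T : List (Int × Int × Int × Int)) (out : Bool) : Decidable (Spec_solve_thirteen T out) := by unfold Spec_solve_thirteen; infer_instance

-- ===== CLAIM (what is proved, stated in full; the proofs are below) =====
def Claim_equal_solve_thirteen : Prop := ∀ (T : List (Int × Int × Int × Int)), Dom_solve_thirteen T → Spec_solve_thirteen T (solve_thirteen T)

-- ===== LEMMAS AND PROOFS =====

-- the common characterisation: from 'tail' one can pick a subsequence p completing the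
-- current state (count c, sum s, already-chosen w) to 13 pairwise-"disjoint" rectangles
-- whose quirk-areas sum to 2024; later picks are checked against earlier ones.
def Good (tail : List (Int × Int × Int × Int)) (c s : Int)
    (w : List (Int × Int × Int × Int)) : Prop :=
  ∃ p : List (Int × Int × Int × Int), p.Sublist tail ∧ c + p.length = 13 ∧
    s + (p.map (fun t => |t.2.1 - t.1| * |t.2.1 - t.1|)).sum = 2024 ∧
    (∀ a ∈ w, ∀ b ∈ p, disjointB b a = true) ∧
    p.Pairwise (fun x y => disjointB y x = true)

theorem good_nil {c s : Int} {w : List (Int × Int × Int × Int)} :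
    Good [] c s w ↔ (c = 13 ∧ s = 2024) := by
  constructor
  · rintro ⟨p, hsub, hc, hs, -, -⟩
    have : p = [] := List.sublist_nil.mp hsub
    subst this; simp at hc hs ⊢; omega
  · rintro ⟨hc, hs⟩
    exact ⟨[], List.nil_sublist _, by simp [hc], by simp [hs], by simp, by simp⟩

theorem good_cons {x : Int × Int × Int × Int} {tail : List (Int × Int × Int × Int)}
    {c s : Int} {w : List (Int × Int × Int × Int)} :
    Good (x :: tail) c s w ↔
      ((∀ a ∈ w, disjointB x a = true) ∧
        Good tail (c + 1) (s + |x.2.1 - x.1| * |x.2.1 - x.1|) (w ++ [x])) ∨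
      Good tail c s w := by
  constructor
  · rintro ⟨p, hsub, hc, hs, hw, hp⟩
    rcases List.sublist_cons_iff.mp hsub with h | ⟨p', rfl, hp'⟩
    · exact Or.inr ⟨p, h, hc, hs, hw, hp⟩
    · left
      rcases List.pairwise_cons.mp hp with ⟨hx, hp'pw⟩
      refine ⟨fun a ha => hw a ha x (by simp), p', hp', by simp at hc ⊢; omega,
        by simp at hs ⊢; linarith, ?_, hp'pw⟩
      intro a ha b hb
      rcases List.mem_append.mp ha with ha | ha
      · exact hw a ha b (by simp [hb])
      · simp at ha; subst ha; exact hx b hb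
  · rintro (⟨hx, p', hp', hc, hs, hw, hp'pw⟩ | ⟨p, hsub, hc, hs, hw, hp⟩)
    · refine ⟨x :: p', List.cons_sublist_cons.mpr hp', by simp at hc ⊢; omega,
        by simp at hs ⊢; linarith, ?_, ?_⟩
      · intro a ha b hb
        rcases List.mem_cons.mp hb with rfl | hb
        · exact hx a ha
        · exact hw a (by simp [ha]) b hb
      · exact List.pairwise_cons.mpr ⟨fun b hb => hw x (by simp) b hb, hp'pw⟩
    · exact ⟨p, hsub.cons x, hc, hs, hw, hp⟩

-- A's recursion computes Good on the remaining suffix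
theorem rek_char (T : List (Int × Int × Int × Int)) :
    ∀ (fuel i : Nat) (c s : Int) (w : List (Int × Int × Int × Int)),
      T.length - i ≤ fuel →
      (rek_pomoc T T.length i c s w = true ↔ Good (T.drop i) c s w) := by
  intro fuel
  induction fuel with
  | zero =>
    intro i c s w hf
    have hi : T.length ≤ i := by omega
    rw [rek_pomoc]
    simp only [List.drop_eq_nil_of_le hi, good_nil]
    split_ifs <;> simp_all
  | succ n ih =>
    intro i c s w hf
    rw [rek_pomoc]
    split_ifs with h1 h2
    · simp only [true_iff]
      exact ⟨[], List.nil_sublist _, by simp [h1.1], by simp [h1.2], by simp, by simp⟩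
    · simp only [List.drop_eq_nil_of_le h2, good_nil]
      simp_all
    · have hi : i < T.length := by omega
      have hdrop : T.drop i = T[i] :: T.drop (i + 1) := List.drop_eq_getElem_cons hi
      have hget : T.getD i (0, 0, 0, 0) = T[i] := List.getD_eq_getElem T _ hi
      rw [hdrop, good_cons]
      simp only [hget]
      have ihT := ih (i + 1) (c + 1)
        (s + |T[i].2.1 - T[i].1| * |T[i].2.1 - T[i].1|) (w ++ [T[i]]) (by omega)
      have ihS := ih (i + 1) c s w (by omega)
      by_cases hall : w.all (fun b =>
          T[i].2.1 < b.1 || T[i].1 > b.2.1 || T[i].2.2.2 < b.2.2.1 || T[i].2.2.1 > b.2.2.2)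
      · have hall' : ∀ a ∈ w, disjointB T[i] a = true := by
          intro a ha; have := (List.all_eq_true.mp hall) a ha
          simpa [disjointB] using this
        simp only [hall, if_true]
        constructor
        · intro h
          split_ifs at h with htake
          · exact Or.inl ⟨hall', ihT.mp htake⟩
          · exact Or.inr (ihS.mp h)
        · rintro (⟨-, hg⟩ | hg)
          · split_ifs with htake
            · rfl
            · exact absurd (ihT.mpr hg) htake
          · split_ifs with htake
            · rfl
            · exact ihS.mpr hg
      · rw [Bool.not_eq_true] at hall
        simp only [hall, Bool.false_eq_true, if_false]
        rw [ihS]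
        constructor
        · exact Or.inr
        · rintro (⟨hx, -⟩ | hg)
          · exfalso
            have htrue : (w.all fun b =>
                T[i].2.1 < b.1 || T[i].1 > b.2.1 || T[i].2.2.2 < b.2.2.1 ||
                  T[i].2.2.1 > b.2.2.2) = true :=
              List.all_eq_true.mpr fun a ha => hx a ha
            rw [htrue] at hall
            simp at hall
          · exact hg

-- B's loop computes Good on the remaining suffix (when count ≠ 13)
theorem loop_char (T : List (Int × Int × Int × Int)) :
    ∀ (fuel j : Nat) (c s : Int) (w : List (Int × Int × Int × Int)),
      T.length - j ≤ fuel → c ≠ 13 →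
      (loopB T T.length j c s w = true ↔ Good (T.drop j) c s w) := by
  intro fuel
  induction fuel with
  | zero =>
    intro j c s w hf hc
    have hj : T.length ≤ j := by omega
    rw [loopB]
    simp only [List.drop_eq_nil_of_le hj, good_nil, if_pos hj, Bool.false_eq_true, false_iff]
    exact fun h => hc h.1
  | succ n ih =>
    intro j c s w hf hc
    rw [loopB]
    split_ifs with h2
    · simp only [List.drop_eq_nil_of_le h2, good_nil, false_iff]
      exact fun h => hc h.1
    · have hj : j < T.length := by omega
      have hdrop : T.drop j = T[j] :: T.drop (j + 1) := List.drop_eq_getElem_cons hj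
      have hget : T.getD j (0, 0, 0, 0) = T[j] := List.getD_eq_getElem T _ hj
      rw [hdrop, good_cons]
      simp only [hget]
      have hsq : |T[j].2.1 - T[j].1| ^ 2 = |T[j].2.1 - T[j].1| * |T[j].2.1 - T[j].1| := sq _
      -- characterise the inner searchB call at count + 1
      have hsearch : searchB T T.length (j + 1) (c + 1)
            (s + |T[j].2.1 - T[j].1| ^ 2) (w ++ [T[j]]) = true ↔
          Good (T.drop (j + 1)) (c + 1)
            (s + |T[j].2.1 - T[j].1| * |T[j].2.1 - T[j].1|) (w ++ [T[j]]) := by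
        rw [searchB, hsq]
        by_cases hc1 : c + 1 = (13 : Int)
        · simp only [hc1, if_true]
          constructor
          · intro h
            refine ⟨[], List.nil_sublist _, by simp only [List.length_nil, Int.natCast_zero, add_zero],
              by simp only [List.map_nil, List.sum_nil, add_zero]; exact of_decide_eq_true h,
              by simp, by simp⟩
          · rintro ⟨p, -, hlen, hsum, -, -⟩
            have : p = [] := by
              cases p with
              | nil => rfl
              | cons a q => simp at hlen; omega
            subst this
            simp only [List.map_nil, List.sum_nil, add_zero] at hsum
            exact decide_eq_true hsum
        · simp only [hc1, if_false]
          exact ih (j + 1) (c + 1) _ _ (by omega) hc1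
      have ihS := ih (j + 1) c s w (by omega) hc
      constructor
      · intro h
        split_ifs at h with htake
        · rw [Bool.and_eq_true] at htake
          exact Or.inl ⟨fun a ha => (List.all_eq_true.mp htake.1) a ha, hsearch.mp htake.2⟩
        · exact Or.inr (ihS.mp h)
      · rintro (⟨hx, hg⟩ | hg)
        · split_ifs with htake
          · rfl
          · exfalso
            rw [Bool.and_eq_true] at htake
            exact htake ⟨List.all_eq_true.mpr hx, hsearch.mpr hg⟩
        · split_ifs with htake
          · rfl
          · exact ihS.mpr hg

-- ===== VERDICT (by name: the statement is the Claim_ definition above) =====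
theorem solve_thirteen_spec : Claim_equal_solve_thirteen := by
  intro T _
  unfold Spec_solve_thirteen solve_thirteen solve_thirteen_alt
  rw [Bool.eq_iff_iff]
  rw [rek_char T (T.length) 0 0 0 [] (by omega)]
  rw [searchB]
  simp only [show ((0 : Int) = 13) = False by simp, if_false]
  rw [loop_char T (T.length) 0 0 0 [] (by omega) (by decide)]
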